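-- pv_equiv track=rewrite | github.com/Fushy/LearnWords | questions_answers_training.py | closest_space_index
-- ===== SOURCE A (Python) =====
-- def closest_space_index(text: str) -> int:
--     if " " not in text:
--         return -1
--     midpoint = len(text) // 2
--     left_move, right_move = 0, 0
--     while True:
--         if 0 <= midpoint - left_move and text[midpoint - left_move] == ' ':
--             return midpoint - left_move
--         if midpoint + right_move < len(text) and text[midpoint + right_move] == ' ':
--             return midpoint + right_move
--         left_move += 1
--         right_move += 1
-- ===== SOURCE B (Python) =====
-- def closest_space_index(text: str) -> int:
--     spaces = [i for i, c in enumerate(text) if c == ' ']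
--     if not spaces:
--         return -1
--     mid = len(text) // 2
--     return min(spaces, key=lambda i: abs(i - mid))
-- ===== Notes on version B (the rewrite author's own statement) =====
-- stated objective: simpler
-- what changed: Replaces the outward two-pointer scan from the midpoint with one forward pass collecting all space indices followed by min with key abs(i-mid), whose first-minimum rule reproduces A's left-on-tie choice.
import Mathlib
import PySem

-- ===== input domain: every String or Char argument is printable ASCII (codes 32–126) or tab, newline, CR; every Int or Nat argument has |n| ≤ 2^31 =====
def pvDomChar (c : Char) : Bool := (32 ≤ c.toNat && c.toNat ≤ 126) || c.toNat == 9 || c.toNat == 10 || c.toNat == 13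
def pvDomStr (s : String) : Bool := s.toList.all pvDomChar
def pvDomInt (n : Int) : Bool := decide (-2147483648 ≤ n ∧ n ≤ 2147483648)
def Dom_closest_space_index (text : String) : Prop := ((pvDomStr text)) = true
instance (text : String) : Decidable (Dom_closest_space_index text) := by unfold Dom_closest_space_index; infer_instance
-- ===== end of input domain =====

-- B replaces A's outward two-pointer scan from the midpoint by collecting all space
-- indices in one pass and taking min by distance to the midpoint (objective: simpler).

-- ===== PORT A =====
-- A's `while True` loop; the fuel argument only makes the computation total (the loop
-- always returns within len(text)+1 iterations once a space is known to exist).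
def pvALoop (cs : List Char) (midpoint : Int) (m : Int) : Nat → Int
  | 0 => -1
  | fuel+1 =>
    if 0 ≤ midpoint - m ∧ PySem.List.pyGet? cs (midpoint - m) = some ' ' then midpoint - m
    else if midpoint + m < (cs.length : Int) ∧ PySem.List.pyGet? cs (midpoint + m) = some ' ' then
      midpoint + m
    else pvALoop cs midpoint (m + 1) fuel

def closest_space_index (text : String) : Int :=
  let cs := text.toList
  if ¬ (' ' ∈ cs) then -1
  else pvALoop cs (PySem.Int.floordiv (cs.length : Int) 2) 0 (cs.length + 1)

-- ===== PORT B =====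
def closest_space_index_alt (text : String) : Int :=
  match PySem.List.min?
      (((PySem.List.enumerate text.toList).filter (fun p => p.2 == ' ')).map (·.1))
      (fun i => |i - PySem.Int.floordiv (text.toList.length : Int) 2|) with
  | none => -1
  | some m => m

-- ===== PRECONDITION & SPEC =====
def Spec_closest_space_index (text : String) (out : Int) : Prop := out = closest_space_index_alt text
instance (text : String) (out : Int) : Decidable (Spec_closest_space_index text out) := by unfold Spec_closest_space_index; infer_instance

-- ===== CLAIM (what is proved, stated in full; the proofs are below) =====
def Claim_equal_closest_space_index : Prop := ∀ (text : String), Dom_closest_space_index text → Spec_closest_space_index text (closest_space_index text)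

-- ===== LEMMAS AND PROOFS =====

-- `j` is a valid index of `cs` holding a space
def SpIdx (cs : List Char) (j : Int) : Prop :=
  ∃ (k : Nat), j = (k : Int) ∧ ∃ (h : k < cs.length), cs[k] = ' '

-- the unique "best" answer: a space index, minimal distance to mid, leftmost on ties
def Best (cs : List Char) (mid r : Int) : Prop :=
  SpIdx cs r ∧ ∀ j, SpIdx cs j → |r - mid| < |j - mid| ∨ (|r - mid| = |j - mid| ∧ r ≤ j)

theorem Best_unique {cs : List Char} {mid r₁ r₂ : Int}
    (h₁ : Best cs mid r₁) (h₂ : Best cs mid r₂) : r₁ = r₂ := by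
  obtain ⟨m₁, b₁⟩ := h₁
  obtain ⟨m₂, b₂⟩ := h₂
  rcases b₁ r₂ m₂ with h | ⟨he, hle⟩ <;> rcases b₂ r₁ m₁ with h' | ⟨he', hle'⟩ <;> omega

theorem spIdx_of_pyGet? {cs : List Char} {i : Int} (h0 : 0 ≤ i)
    (h : PySem.List.pyGet? cs i = some ' ') : SpIdx cs i := by
  rw [PySem.List.pyGet?_of_nonneg cs h0] at h
  rw [List.getElem?_eq_some_iff] at h
  obtain ⟨hlt, hc⟩ := h
  exact ⟨i.toNat, by omega, hlt, hc⟩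

theorem pyGet?_of_spIdx {cs : List Char} {i : Int} (h : SpIdx cs i) :
    PySem.List.pyGet? cs i = some ' ' := by
  obtain ⟨k, rfl, hk, hc⟩ := h
  rw [PySem.List.pyGet?_natCast, List.getElem?_eq_some_iff]
  exact ⟨hk, hc⟩

theorem spIdx_bounds {cs : List Char} {i : Int} (h : SpIdx cs i) :
    0 ≤ i ∧ i < (cs.length : Int) := by
  obtain ⟨k, rfl, hk, _⟩ := h
  omega

theorem spIdx_of_mem {cs : List Char} (h : ' ' ∈ cs) : ∃ j, SpIdx cs j := by
  obtain ⟨k, hk, hc⟩ := List.mem_iff_getElem.mp h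
  exact ⟨k, k, rfl, hk, hc⟩

-- A's loop returns the best answer, given that no space lies strictly closer than m
theorem pvALoop_best (cs : List Char) (mid : Int) (hmid0 : 0 ≤ mid)
    (hmidlt : mid < (cs.length : Int)) :
    ∀ (fuel : Nat) (m : Int), 0 ≤ m → (∀ j, SpIdx cs j → m ≤ |j - mid|) →
      (∃ j, SpIdx cs j) → (cs.length : Int) + 1 ≤ m + fuel →
      Best cs mid (pvALoop cs mid m fuel) := by
  intro fuel
  induction fuel with
  | zero =>
    intro m _ hfar hex hbig
    exfalso
    obtain ⟨j, hj⟩ := hex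
    have hb := spIdx_bounds hj
    have := hfar j hj
    rcases abs_cases (j - mid) with ⟨h, _⟩ | ⟨h, _⟩ <;> omega
  | succ fuel ih =>
    intro m hm0 hfar hex hbig
    rw [pvALoop]
    split_ifs with hL hR
    · -- return mid - m
      refine ⟨spIdx_of_pyGet? hL.1 hL.2, ?_⟩
      intro j hj
      have := hfar j hj
      rcases abs_cases (j - mid) with ⟨h, _⟩ | ⟨h, _⟩ <;>
        rcases abs_cases (mid - m - mid) with ⟨h', _⟩ | ⟨h', _⟩ <;> omega
    · -- return mid + m
      refine ⟨spIdx_of_pyGet? (by omega) hR.2, ?_⟩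
      intro j hj
      have hj' := hfar j hj
      have hb := spIdx_bounds hj
      have hnotleft : j ≠ mid - m ∨ j = mid + m := by
        by_cases hjm : j = mid - m
        · subst hjm
          exact absurd ⟨hb.1, pyGet?_of_spIdx hj⟩ hL
        · exact Or.inl hjm
      rcases abs_cases (j - mid) with ⟨h, _⟩ | ⟨h, _⟩ <;>
        rcases abs_cases (mid + m - mid) with ⟨h', _⟩ | ⟨h', _⟩ <;> omega
    · -- no space at distance exactly m: recurse
      have hfar' : ∀ j, SpIdx cs j → m + 1 ≤ |j - mid| := by
        intro j hj
        have hj' := hfar j hj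
        have hb := spIdx_bounds hj
        have hne : ¬ (|j - mid| = m) := by
          intro habs
          have hcases : j = mid - m ∨ j = mid + m := by
            rcases abs_cases (j - mid) with ⟨h, _⟩ | ⟨h, _⟩ <;> omega
          rcases hcases with rfl | rfl
          · exact hL ⟨hb.1, pyGet?_of_spIdx hj⟩
          · exact hR ⟨hb.2, pyGet?_of_spIdx hj⟩
        rcases abs_cases (j - mid) with ⟨h, _⟩ | ⟨h, _⟩ <;> omega
      exact ih (m + 1) (by omega) hfar' hex (by omega)

-- `min?` on a nonempty list is the plain first-minimum fold
theorem min?_cons (key : Int → Int) :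
    ∀ (t : List Int) (x : Int), PySem.List.min? (x :: t) key =
      some (t.foldl (fun m y => if key y < key m then y else m) x) := by
  intro t
  induction t with
  | nil => intro x; simp [PySem.List.min?]
  | cons b t ih =>
    intro x
    have h1 := ih (if key b < key x then b else x)
    simp only [PySem.List.min?, List.foldl_cons] at h1 ⊢
    split_ifs at h1 ⊢ <;> simpa using h1

-- the plain fold keeps the FIRST minimum; on a strictly increasing list that is the
-- smallest element among the minima
theorem foldl_min_first (key : Int → Int) (t : List Int) :
    ∀ (a : Int), (∀ y ∈ t, a < y) → t.Pairwise (· < ·) →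
      (t.foldl (fun m x => if key x < key m then x else m) a = a ∨
        t.foldl (fun m x => if key x < key m then x else m) a ∈ t) ∧
      ∀ y, (y = a ∨ y ∈ t) →
        (key (t.foldl (fun m x => if key x < key m then x else m) a) < key y ∨
          (key (t.foldl (fun m x => if key x < key m then x else m) a) = key y ∧
            t.foldl (fun m x => if key x < key m then x else m) a ≤ y)) := by
  induction t with
  | nil =>
    intro a _ _
    refine ⟨Or.inl rfl, ?_⟩
    rintro y (rfl | h)
    · exact Or.inr ⟨rfl, le_refl _⟩
    · simp at h
  | cons b t ih =>
    intro a hlt hpw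
    have hab : a < b := hlt b (List.mem_cons_self ..)
    have hpw' : t.Pairwise (· < ·) := hpw.of_cons
    have hblt : ∀ y ∈ t, b < y := fun y hy => (List.pairwise_cons.mp hpw).1 y hy
    have halt : ∀ y ∈ t, a < y := fun y hy => hlt y (List.mem_cons_of_mem _ hy)
    simp only [List.foldl_cons]
    by_cases hkey : key b < key a
    · simp only [if_pos hkey]
      obtain ⟨hmem, hbest⟩ := ih b hblt hpw'
      refine ⟨?_, ?_⟩
      · rcases hmem with h | h
        · exact Or.inr (by rw [h]; exact List.mem_cons_self ..)
        · exact Or.inr (List.mem_cons_of_mem _ h)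
      · rintro y (rfl | hy)
        · rcases hbest b (Or.inl rfl) with h | ⟨h, _⟩
          · exact Or.inl (lt_trans h hkey)
          · exact Or.inl (h ▸ hkey)
        · rcases List.mem_cons.mp hy with rfl | hy'
          · exact hbest y (Or.inl rfl)
          · exact hbest y (Or.inr hy')
    · simp only [if_neg hkey]
      obtain ⟨hmem, hbest⟩ := ih a halt hpw'
      refine ⟨?_, ?_⟩
      · rcases hmem with h | h
        · exact Or.inl h
        · exact Or.inr (List.mem_cons_of_mem _ h)
      · rintro y (rfl | hy)
        · exact hbest y (Or.inl rfl)
        · rcases List.mem_cons.mp hy with rfl | hy'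
          · -- y = b : key a ≤ key b
            rcases hbest a (Or.inl rfl) with h | ⟨h, hle⟩
            · rcases lt_or_eq_of_le (not_lt.mp hkey) with h2 | h2
              · exact Or.inl (lt_trans h h2)
              · exact Or.inl (h2 ▸ h)
            · rcases lt_or_eq_of_le (not_lt.mp hkey) with h2 | h2
              · exact Or.inl (h ▸ h2)
              · exact Or.inr ⟨h.trans h2, le_of_lt (lt_of_le_of_lt hle hab)⟩
          · exact hbest y (Or.inr hy')

theorem mem_spaces_iff (cs : List Char) (i : Int) :
    i ∈ (((PySem.List.enumerate cs).filter (fun p => p.2 == ' ')).map (·.1)) ↔ SpIdx cs i := by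
  simp only [List.mem_map, List.mem_filter, PySem.List.mem_enumerate_iff, SpIdx]
  constructor
  · rintro ⟨⟨a, c⟩, ⟨⟨k, hk, hpq⟩, hsp⟩, rfl⟩
    obtain ⟨rfl, rfl⟩ := Prod.mk.injEq .. ▸ hpq
    exact ⟨k, by omega, hk, by simpa using hsp⟩
  · rintro ⟨k, rfl, hk, hc⟩
    exact ⟨((k : Int), ' '), ⟨⟨k, hk, by simp [hc]⟩, by simp⟩, rfl⟩

theorem pairwise_spaces (cs : List Char) :
    (((PySem.List.enumerate cs).filter (fun p => p.2 == ' ')).map (·.1)).Pairwise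
      ((· < ·) : Int → Int → Prop) := by
  rw [List.pairwise_map]
  exact (PySem.List.pairwise_lt_enumerate cs 0).filter _

-- B returns the best answer whenever a space exists
theorem alt_best (text : String) (hsp : ' ' ∈ text.toList) :
    Best text.toList (PySem.Int.floordiv (text.toList.length : Int) 2)
      (closest_space_index_alt text) := by
  unfold closest_space_index_alt
  set cs := text.toList with hcs
  set mid := PySem.Int.floordiv (cs.length : Int) 2 with hmid
  set S := ((PySem.List.enumerate cs).filter (fun p => p.2 == ' ')).map (·.1) with hS
  obtain ⟨j, hj⟩ := spIdx_of_mem hsp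
  have hjS : j ∈ S := (mem_spaces_iff cs j).mpr hj
  obtain ⟨x, t, hSe⟩ := List.exists_cons_of_ne_nil (List.ne_nil_of_mem hjS)
  have hpw : (x :: t).Pairwise ((· < ·) : Int → Int → Prop) := hSe ▸ pairwise_spaces cs
  rw [hSe, min?_cons (fun i => |i - mid|) t x]
  show Best cs mid (t.foldl (fun m y => if |y - mid| < |m - mid| then y else m) x)
  obtain ⟨hmem, hbest⟩ := foldl_min_first (fun i => |i - mid|) t x
    (fun y hy => (List.pairwise_cons.mp hpw).1 y hy) hpw.of_cons
  set r := t.foldl (fun m y => if |y - mid| < |m - mid| then y else m) x with hr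
  have hrS : r ∈ x :: t := by
    rcases hmem with h | h
    · exact h ▸ List.mem_cons_self ..
    · exact List.mem_cons_of_mem _ h
  refine ⟨(mem_spaces_iff cs r).mp (show r ∈ S from hSe ▸ hrS), ?_⟩
  intro i hi
  have hiS : i ∈ x :: t := hSe ▸ (show i ∈ S from (mem_spaces_iff cs i).mpr hi)
  exact hbest i (List.mem_cons.mp hiS)

-- ===== VERDICT (by name: the statement is the Claim_ definition above) =====
theorem closest_space_index_spec : Claim_equal_closest_space_index := by
  intro text _
  unfold Spec_closest_space_index
  by_cases hsp : ' ' ∈ text.toList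
  · have hA : closest_space_index text =
        pvALoop text.toList (PySem.Int.floordiv (text.toList.length : Int) 2) 0
          (text.toList.length + 1) := by
      unfold closest_space_index
      simp [hsp]
    obtain ⟨j, hj⟩ := spIdx_of_mem hsp
    have hb := spIdx_bounds hj
    have hlen : 1 ≤ (text.toList.length : Int) := by omega
    have hmid : PySem.Int.floordiv (text.toList.length : Int) 2 =
        (text.toList.length : Int) / 2 := by
      simp [PySem.Int.floordiv, Int.fdiv_eq_ediv]
    have hAbest : Best text.toList (PySem.Int.floordiv (text.toList.length : Int) 2)
        (closest_space_index text) := by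
      rw [hA]
      exact pvALoop_best text.toList _ (by rw [hmid]; omega) (by rw [hmid]; omega)
        (text.toList.length + 1) 0 (le_refl 0) (fun j _ => abs_nonneg _) ⟨j, hj⟩ (by omega)
    exact Best_unique hAbest (alt_best text hsp)
  · have hA : closest_space_index text = -1 := by
      unfold closest_space_index
      simp [hsp]
    have hB : closest_space_index_alt text = -1 := by
      unfold closest_space_index_alt
      have hS : ((PySem.List.enumerate text.toList).filter (fun p => p.2 == ' ')).map
          ((·.1) : Int × Char → Int) = [] := by
        rw [List.eq_nil_iff_forall_not_mem]
        intro i hi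
        obtain ⟨k, _, _, hc⟩ := (mem_spaces_iff _ _).mp hi
        exact hsp (hc ▸ List.getElem_mem _)
      simp [hS, PySem.List.min?]
    rw [hA, hB]
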